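-- pv_equiv track=rewrite | github.com/aditigupta3/my-foobar | Level2/lovely-lucky-lambs/solution.py | generous_pay
-- ===== SOURCE A (Python) =====
-- def generous_pay(lamb):
--     """
--     Function to get the number of henchmen getting paid if the commander is as generous as possible.
--     :param lamb:
--     :return: number of henchmen getting paid
--     """
--     # Rule 2 - A henchman will revolt if the person who ranks immediately above them gets more than double
--     #     the number of LAMBs they do.
--     # Because of this rule, this case becomes like a geometric series with common ratio=2.
--     if lamb < 2:
--         return lamb
--     else:
--         # Saving the number and sum of series as a list.
--         l = [(1, 1)]
--         while True:
--             new = l[-1][0]*2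
--             l.append((new, l[-1][1]+new))
--             if l[-1][1] > lamb:
--                 break
--         l = l[:-1]
--         final_sum = l[-1][1]
--         remaining = lamb - final_sum
--         if len(l) >= 2:
--             # If the remaining amount follows rule 3, 1 more henchman can be paid.
--             if remaining > l[-1][1] + l[-2][1]:
--                 return len(l) + 1
--         return len(l)
-- ===== SOURCE B (Python) =====
-- def generous_pay(lamb):
--     """
--     Number of henchmen paid when the commander is as generous as possible.
--     Payments form 1, 2, 4, ... so k henchmen cost 2**k - 1 LAMBs; the answer is
--     the largest k with 2**k - 1 <= lamb, i.e. the bit length of lamb + 1 minus 1.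
--     """
--     if lamb < 2:
--         return lamb
--     return (lamb + 1).bit_length() - 1
-- ===== Notes on version B (the rewrite author's own statement) =====
-- stated objective: simpler
-- what changed: Replaced the loop that materialises the geometric series as a list (plus a dead 'rule 3' branch) with the closed form (lamb+1).bit_length()-1, the largest k with 2^k-1 <= lamb.
import Mathlib
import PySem

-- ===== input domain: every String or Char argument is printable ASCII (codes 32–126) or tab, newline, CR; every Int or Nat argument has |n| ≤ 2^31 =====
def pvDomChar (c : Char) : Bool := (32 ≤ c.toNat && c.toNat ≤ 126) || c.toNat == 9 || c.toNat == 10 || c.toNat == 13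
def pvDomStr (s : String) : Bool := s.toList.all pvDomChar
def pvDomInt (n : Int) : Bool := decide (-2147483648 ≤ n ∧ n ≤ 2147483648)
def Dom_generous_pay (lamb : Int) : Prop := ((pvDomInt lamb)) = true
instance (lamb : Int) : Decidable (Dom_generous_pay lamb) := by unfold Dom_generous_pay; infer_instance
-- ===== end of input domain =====

-- B replaces A's list-building loop (and its dead 'rule 3' branch) with the
-- closed form (lamb+1).bit_length()-1: objective = simpler.

-- ===== PORT A =====
-- A's `while True` loop, transliterated with fuel (lamb+2).toNat; the loop's
-- running sum grows by at least 1 each turn, so the fuel provably never runs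
-- out on the inputs reached (lamb ≥ 2) — see lemma generous_loopA_gl below.
-- State is A's list `l` of (term, running sum); l[-1] via getLast?.getD.
def generous_loopA (lamb : Int) (l : List (Int × Int)) (fuel : Nat) : List (Int × Int) :=
  match fuel with
  | 0 => l
  | fuel + 1 =>
    let last := l.getLast?.getD (1, 1)
    let new := last.1 * 2
    let l' := l ++ [(new, last.2 + new)]
    if last.2 + new > lamb then l' else generous_loopA lamb l' fuel

def generous_pay (lamb : Int) : Int :=
  if lamb < 2 then lamb
  else
    let l0 := generous_loopA lamb [(1, 1)] (lamb + 2).toNat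
    let l := l0.dropLast                         -- l = l[:-1]
    let final_sum := (l.getLast?.getD (1, 1)).2  -- l[-1][1]
    let remaining := lamb - final_sum
    if l.length ≥ 2 then
      -- l[-2][1] as the last of dropLast
      if remaining > final_sum + (l.dropLast.getLast?.getD (1, 1)).2 then
        (l.length : Int) + 1
      else (l.length : Int)
    else (l.length : Int)

-- ===== PORT B =====
-- (lamb+1).bit_length() - 1: for lamb ≥ 2 we have lamb+1 ≥ 3 > 0, and Python's
-- int.bit_length on a positive n is Nat.log2 n + 1, so the result is Nat.log2.
def generous_pay_alt (lamb : Int) : Int :=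
  if lamb < 2 then lamb
  else (Nat.log2 (lamb + 1).toNat : Int)

-- ===== PRECONDITION & SPEC =====
def Spec_generous_pay (lamb : Int) (out : Int) : Prop := out = generous_pay_alt lamb
instance (lamb : Int) (out : Int) : Decidable (Spec_generous_pay lamb out) := by unfold Spec_generous_pay; infer_instance

-- ===== CLAIM (what is proved, stated in full; the proofs are below) =====
def Claim_equal_generous_pay : Prop := ∀ (lamb : Int), Dom_generous_pay lamb → Spec_generous_pay lamb (generous_pay lamb)

-- ===== LEMMAS AND PROOFS =====

-- The geometric list A builds: gl m = [(2^i, 2^(i+1)-1) | i ← 0..m].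
def gl (m : Nat) : List (Int × Int) :=
  (List.range (m + 1)).map (fun i => ((2 : Int) ^ i, 2 ^ (i + 1) - 1))

theorem gl_length (m : Nat) : (gl m).length = m + 1 := by
  simp [gl]

theorem gl_getLast? (m : Nat) :
    (gl m).getLast? = some ((2 : Int) ^ m, 2 ^ (m + 1) - 1) := by
  simp [gl, List.getLast?_eq_getElem?]

theorem gl_append (m : Nat) :
    gl m ++ [((2 : Int) ^ (m + 1), 2 ^ (m + 2) - 1)] = gl (m + 1) := by
  simp [gl, List.range_succ]

theorem gl_dropLast (m : Nat) : (gl (m + 1)).dropLast = gl m := by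
  rw [← gl_append m]
  simp

theorem two_pow_int (n : Nat) : ((2 : Int) ^ n) = ((2 ^ n : Nat) : Int) := by
  push_cast; ring

-- If 2^n ≤ lamb+1 < 2^(n+1) (over Int) then Nat.log2 (lamb+1).toNat = n.
theorem log2_char (lamb : Int) (n : Nat)
    (h1 : (2 : Int) ^ n ≤ lamb + 1) (h2 : lamb + 1 < 2 ^ (n + 1)) :
    Nat.log2 (lamb + 1).toNat = n := by
  rw [Nat.log2_eq_log_two]
  apply Nat.log_eq_of_pow_le_of_lt_pow
  · have := two_pow_int n ▸ h1
    omega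
  · have := two_pow_int (n + 1) ▸ h2
    omega

-- Main loop characterisation: starting from gl m with the current sum still
-- ≤ lamb, the loop returns gl n where n = Nat.log2 (lamb+1).toNat, provided
-- enough fuel (the sum grows each turn, so (lamb - sum).toNat bounds the turns).
theorem generous_loopA_gl (lamb : Int) :
    ∀ (fuel m : Nat), (2 : Int) ^ (m + 1) - 1 ≤ lamb →
      (lamb - ((2 : Int) ^ (m + 1) - 1)).toNat < fuel →
      generous_loopA lamb (gl m) fuel = gl (Nat.log2 (lamb + 1).toNat) := by
  intro fuel
  induction fuel with
  | zero => intro m _ hf; omega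
  | succ fuel ih =>
    intro m hle hf
    have hpow2 : (1 : Int) ≤ 2 ^ (m + 1) := by
      have := pow_pos (show (0:Int) < 2 by norm_num) (m + 1); omega
    show (if ((gl m).getLast?.getD (1,1)).2 + ((gl m).getLast?.getD (1,1)).1 * 2 > lamb
          then gl m ++ [(((gl m).getLast?.getD (1,1)).1 * 2,
                ((gl m).getLast?.getD (1,1)).2 + ((gl m).getLast?.getD (1,1)).1 * 2)]
          else generous_loopA lamb
            (gl m ++ [(((gl m).getLast?.getD (1,1)).1 * 2,
                ((gl m).getLast?.getD (1,1)).2 + ((gl m).getLast?.getD (1,1)).1 * 2)]) fuel)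
        = gl (Nat.log2 (lamb + 1).toNat)
  -- rewrite the last element and the appended list
    rw [gl_getLast?]
    have hterm : ((2 : Int) ^ m) * 2 = 2 ^ (m + 1) := by ring
    have hsum : ((2 : Int) ^ (m + 1) - 1) + 2 ^ m * 2 = 2 ^ (m + 2) - 1 := by ring
    simp only [Option.getD_some]
    rw [hterm, show ((2:Int) ^ (m+1) - 1) + 2 ^ (m+1) = 2 ^ (m+2) - 1 by ring]
    rw [gl_append]
    by_cases hc : (2 : Int) ^ (m + 2) - 1 > lamb
    · rw [if_pos hc]
      have hn : Nat.log2 (lamb + 1).toNat = m + 1 := by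
        apply log2_char
        · omega
        · omega
      rw [hn]
    · rw [if_neg hc]
      apply ih (m + 1) (by omega)
      have h2 : (1 : Int) ≤ 2 ^ (m + 1) := hpow2
      have : (2 : Int) ^ (m + 2) = 2 * 2 ^ (m + 1) := by ring
      omega

theorem gl_zero : gl 0 = [(1, 1)] := by decide

-- ===== VERDICT (by name: the statement is the Claim_ definition above) =====
theorem generous_pay_spec : Claim_equal_generous_pay := by
  intro lamb _
  unfold Spec_generous_pay generous_pay generous_pay_alt
  by_cases hlt : lamb < 2
  · simp [hlt]
  · rw [if_neg hlt, if_neg hlt]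
    replace hlt : 2 ≤ lamb := by omega
    set n := Nat.log2 (lamb + 1).toNat with hn
    clear_value n
    have hloop : generous_loopA lamb [(1, 1)] (lamb + 2).toNat = gl n := by
      rw [← gl_zero, hn]
      apply generous_loopA_gl
      · have : (2 : Int) ^ (0 + 1) = 2 := by norm_num
        omega
      · have : (2 : Int) ^ (0 + 1) = 2 := by norm_num
        omega
    -- n ≥ 1 since lamb + 1 ≥ 3
    have hn1 : 1 ≤ n := by
      rw [hn, Nat.log2_eq_log_two]
      have : 2 ^ 1 ≤ (lamb + 1).toNat := by omega
      calc 1 = Nat.log 2 (2 ^ 1) := by decide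
        _ ≤ Nat.log 2 (lamb + 1).toNat := Nat.log_mono_right this
    -- bounds 2^n ≤ lamb+1 < 2^(n+1)
    obtain ⟨m, rfl⟩ : ∃ m, n = m + 1 := ⟨n - 1, by omega⟩
    have hlb : (2 : Int) ^ (m + 1) ≤ lamb + 1 := by
      have h := Nat.pow_log_le_self 2 (x := (lamb + 1).toNat) (by omega)
      rw [← Nat.log2_eq_log_two, ← hn] at h
      have := two_pow_int (m + 1)
      omega
    have hub : lamb + 1 < (2 : Int) ^ (m + 2) := by
      have h := Nat.lt_pow_succ_log_self (b := 2) (by norm_num) (lamb + 1).toNat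
      rw [← Nat.log2_eq_log_two, ← hn] at h
      have e1 : (2 : Nat) ^ (m + 1 + 1) = 2 ^ (m + 2) := by ring_nf
      rw [e1] at h
      have := two_pow_int (m + 2)
      omega
    simp only [hloop, gl_dropLast, gl_length, gl_getLast?, Option.getD_some]
    by_cases hm : m = 0
    · subst hm
      simp
    · obtain ⟨k, rfl⟩ : ∃ k, m = k + 1 := ⟨m - 1, by omega⟩
      rw [gl_dropLast, gl_getLast?]
      have hlen : (2 : Nat) ≤ k + 1 + 1 := by omega
      rw [if_pos hlen]
      have hk1 : (1 : Int) ≤ 2 ^ (k + 1) := by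
        have := pow_pos (show (0:Int) < 2 by norm_num) (k + 1); omega
      have hq : (2 : Int) ^ (k + 2) = 2 * 2 ^ (k + 1) := by ring
      have hq3 : (2 : Int) ^ (k + 3) = 4 * 2 ^ (k + 1) := by ring
      rw [hq3] at hub
      rw [if_neg (by simp only [Option.getD_some]; omega)]
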